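-- pv_equiv track=rewrite | github.com/voidf/bertalign | helper.py | read_back_int
-- ===== SOURCE A (Python) =====
-- def read_back_int(s: str) -> int:
--     """读最后一个.后的数字"""
--     x = 0
--     for c in s:
--         if c.isdigit():
--             x = x * 10 + int(c)
--         elif c == '.':
--             x = 0
--     return x
-- ===== SOURCE B (Python) =====
-- def read_back_int(s: str) -> int:
--     x = 0
--     mult = 1
--     for c in reversed(s):
--         if c == '.':
--             break
--         if c.isdigit():
--             x += int(c) * mult
--             mult *= 10
--     return x
-- ===== Notes on version B (the rewrite author's own statement) =====
-- stated objective: alternative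
-- what changed: B scans the string in reverse, accumulating digits least-significant-first with a multiplier and breaking at the first dot, instead of A's forward scan that resets the accumulator on every dot.
import Mathlib
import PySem

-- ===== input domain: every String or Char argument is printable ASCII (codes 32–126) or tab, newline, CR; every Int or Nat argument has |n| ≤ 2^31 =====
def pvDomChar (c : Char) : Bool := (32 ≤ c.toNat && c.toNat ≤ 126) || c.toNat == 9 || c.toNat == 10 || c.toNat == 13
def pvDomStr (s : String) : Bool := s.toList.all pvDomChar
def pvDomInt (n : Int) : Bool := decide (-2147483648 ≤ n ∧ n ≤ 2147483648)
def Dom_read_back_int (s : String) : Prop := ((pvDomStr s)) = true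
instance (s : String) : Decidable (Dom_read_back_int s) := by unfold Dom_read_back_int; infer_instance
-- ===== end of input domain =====

-- B reads the number backwards from the end (break at the first dot, multiplier bookkeeping)
-- instead of A's forward scan that resets on each dot: an alternative decomposition, same cost.

-- ===== PORT A =====
-- forward fold: reset to 0 on '.', accumulate digits, ignore everything else
def read_back_int (s : String) : Int :=
  s.toList.foldl
    (fun x c =>
      if PySem.Chars.isdigit c then x * 10 + ((c.toNat : Int) - 48)
      else if c = '.' then 0 else x) 0

-- ===== PORT B =====
-- reverse scan: break at '.', add digit * mult, mult *= 10, skip other chars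
def rbGo : List Char → Int → Int → Int
  | [], x, _ => x
  | c :: cs, x, m =>
    if c = '.' then x
    else if PySem.Chars.isdigit c then rbGo cs (x + ((c.toNat : Int) - 48) * m) (m * 10)
    else rbGo cs x m

def read_back_int_alt (s : String) : Int :=
  rbGo s.toList.reverse 0 1

-- ===== PRECONDITION & SPEC =====
def Spec_read_back_int (s : String) (out : Int) : Prop := out = read_back_int_alt s
instance (s : String) (out : Int) : Decidable (Spec_read_back_int s out) := by unfold Spec_read_back_int; infer_instance

-- ===== CLAIM (what is proved, stated in full; the proofs are below) =====
def Claim_equal_read_back_int : Prop := ∀ (s : String), Dom_read_back_int s → Spec_read_back_int s (read_back_int s)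

-- ===== LEMMAS AND PROOFS =====

theorem rbGo_eq (r : List Char) : ∀ (x m : Int),
    rbGo r x m = x + m * (r.reverse.foldl
      (fun x c =>
        if PySem.Chars.isdigit c then x * 10 + ((c.toNat : Int) - 48)
        else if c = '.' then 0 else x) 0) := by
  induction r with
  | nil => intro x m; simp [rbGo]
  | cons c cs ih =>
    intro x m
    simp only [rbGo, List.reverse_cons, List.foldl_append, List.foldl_cons, List.foldl_nil]
    by_cases hd : c = '.'
    · subst hd
      simp [show PySem.Chars.isdigit '.' = false by decide]
    · by_cases hdig : PySem.Chars.isdigit c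
      · simp only [hdig, if_true, if_neg hd, ih]
        ring
      · simp only [hdig, if_neg hd, Bool.false_eq_true, if_false, ih]

-- ===== VERDICT (by name: the statement is the Claim_ definition above) =====
theorem read_back_int_spec : Claim_equal_read_back_int := by
  intro s _
  show read_back_int s = read_back_int_alt s
  simp [read_back_int, read_back_int_alt, rbGo_eq]
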